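-- pv_equiv track=rewrite | github.com/heewonp/Algorithm | python/programmers/124 나라의 숫자.py | solution
-- ===== SOURCE A (Python) =====
-- def solution(n):
--     answer = ''
--     num_arr = ['1','2','4']
--     while n>0:
--         n-=1
--         answer = num_arr[n%3] + answer
--         n //= 3
--
--     return answer
-- ===== SOURCE B (Python) =====
-- def solution(n):
--     if n <= 0:
--         return ''
--     L = 1
--     while (3 ** (L + 1) - 3) // 2 < n:
--         L += 1
--     o = n - (3 ** L - 3) // 2 - 1
--     return ''.join(['1', '2', '4'][o // 3 ** (L - 1 - i) % 3] for i in range(L))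
-- ===== Notes on version B (the rewrite author's own statement) =====
-- stated objective: alternative
-- what changed: B first finds the digit count L by comparing n against the closed-form block bounds (3^(L+1)-3)/2, derives n's offset within the L-digit block, and reads every digit independently by power-of-3 division, instead of A's while loop that extracts digits one by one and prepends them to a string accumulator.
import Mathlib
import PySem

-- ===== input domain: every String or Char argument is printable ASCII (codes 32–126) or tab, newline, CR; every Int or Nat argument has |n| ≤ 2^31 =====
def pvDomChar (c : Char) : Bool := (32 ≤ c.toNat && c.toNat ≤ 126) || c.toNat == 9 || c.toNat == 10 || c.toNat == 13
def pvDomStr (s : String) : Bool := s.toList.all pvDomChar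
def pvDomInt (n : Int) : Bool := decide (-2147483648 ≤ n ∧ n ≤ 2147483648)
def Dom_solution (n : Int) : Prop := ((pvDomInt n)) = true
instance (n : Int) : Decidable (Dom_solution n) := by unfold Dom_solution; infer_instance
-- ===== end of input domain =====

-- B computes the digit count L from powers of 3 in closed form, takes n's offset inside the
-- L-digit block and reads each digit independently by power-of-3 division, instead of A's
-- digit-by-digit while loop that prepends to a string accumulator; objective: alternative.

-- ===== PORT A =====
-- A's while-loop: state (n, answer); num_arr[n%3] is always in range (0 ≤ (n-1)%3 < 3
-- when n > 0), so pyGetD's default is never used.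
def solutionLoopA (n : Int) (answer : String) : String :=
  if n > 0 then
    let m := n - 1
    solutionLoopA (PySem.Int.floordiv m 3)
      (PySem.List.pyGetD ["1", "2", "4"] (PySem.Int.mod m 3) "" ++ answer)
  else answer
termination_by n.toNat
decreasing_by
  rename_i h
  rw [PySem.Int.floordiv_eq_ediv_of_pos (by norm_num)]
  omega

def solution (n : Int) : String := solutionLoopA n ""

-- ===== PORT B =====
-- helper for the termination of B's digit-count loop (cited by name in decreasing_by)
theorem pow3_lb (L : Nat) : 2 * (L : Int) + 3 ≤ 3 ^ (L + 1) := by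
  induction L with
  | zero => norm_num
  | succ L ih =>
    have h : (3 : Int) ^ (L + 1 + 1) = 3 * 3 ^ (L + 1) := by ring
    push_cast
    omega

-- B's while-loop: smallest L (starting from the given one) with (3^(L+1)-3)//2 >= n
def solutionDigitCount (n : Int) (L : Nat) : Nat :=
  if PySem.Int.floordiv ((3 : Int) ^ (L + 1) - 3) 2 < n then solutionDigitCount n (L + 1)
  else L
termination_by n.toNat - L
decreasing_by
  rename_i h
  rw [PySem.Int.floordiv_eq_ediv_of_pos (by norm_num)] at h
  have := pow3_lb L
  omega

def solution_alt (n : Int) : String :=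
  if n ≤ 0 then ""
  else
    let L := solutionDigitCount n 1
    let o := n - PySem.Int.floordiv ((3 : Int) ^ L - 3) 2 - 1
    PySem.Str.join "" ((List.range L).map (fun i =>
      PySem.List.pyGetD ["1", "2", "4"]
        (PySem.Int.mod (PySem.Int.floordiv o ((3 : Int) ^ (L - 1 - i))) 3) ""))

-- ===== PRECONDITION & SPEC =====
def Spec_solution (n : Int) (out : String) : Prop := out = solution_alt n
instance (n : Int) (out : String) : Decidable (Spec_solution n out) := by unfold Spec_solution; infer_instance

-- ===== CLAIM (what is proved, stated in full; the proofs are below) =====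
def Claim_equal_solution : Prop := ∀ (n : Int), Dom_solution n → Spec_solution n (solution n)

-- ===== LEMMAS AND PROOFS =====

-- count of numbers writable with at most L+0 digits (the loop's bound), proof-side shorthand
def fBound (L : Nat) : Int := ((3 : Int) ^ (L + 1) - 3) / 2

-- the digit list B joins, proof-side shorthand
def digList (o : Int) (L : Nat) : List String :=
  (List.range L).map (fun i =>
    PySem.List.pyGetD ["1", "2", "4"]
      (PySem.Int.mod (PySem.Int.floordiv o ((3 : Int) ^ (L - 1 - i))) 3) "")

theorem pow3_odd (L : Nat) : ∃ k : Int, 0 ≤ k ∧ (3 : Int) ^ L = 2 * k + 1 := by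
  induction L with
  | zero => exact ⟨0, by norm_num⟩
  | succ L ih =>
    obtain ⟨k, hk0, hk⟩ := ih
    exact ⟨3 * k + 1, by omega, by rw [pow_succ, hk]; ring⟩

theorem dc_le (n : Int) (L0 : Nat) : n ≤ fBound (solutionDigitCount n L0) := by
  refine solutionDigitCount.induct n (fun L => n ≤ fBound (solutionDigitCount n L))
    (fun L h ih => ?_) (fun L h => ?_) L0
  · unfold solutionDigitCount
    simp only [if_pos h]
    exact ih
  · unfold solutionDigitCount
    simp only [if_neg h]
    rw [PySem.Int.floordiv_eq_ediv_of_pos (by norm_num)] at h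
    unfold fBound
    omega

theorem dc_lower (n : Int) (L0 : Nat) (h1 : 1 ≤ L0) (h : fBound (L0 - 1) < n) :
    fBound (solutionDigitCount n L0 - 1) < n := by
  refine solutionDigitCount.induct n
    (fun L => 1 ≤ L → fBound (L - 1) < n → fBound (solutionDigitCount n L - 1) < n)
    (fun L hc ih => ?_) (fun L hc h1 h => ?_) L0 h1 h
  · intro _ _
    unfold solutionDigitCount
    simp only [if_pos hc]
    rw [PySem.Int.floordiv_eq_ediv_of_pos (by norm_num)] at hc
    refine ih (by omega) ?_
    have hL : L + 1 - 1 = L := by omega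
    rw [hL]
    unfold fBound
    omega
  · unfold solutionDigitCount
    simp only [if_neg hc]
    exact h

theorem dc_ge (n : Int) (L0 : Nat) : L0 ≤ solutionDigitCount n L0 := by
  refine solutionDigitCount.induct n (fun L => L ≤ solutionDigitCount n L)
    (fun L hc ih => ?_) (fun L hc => ?_) L0
  · unfold solutionDigitCount
    simp only [if_pos hc]
    omega
  · unfold solutionDigitCount
    simp only [if_neg hc]
    exact le_rfl

theorem fBound_mono {a b : Nat} (h : a ≤ b) : fBound a ≤ fBound b := by
  unfold fBound
  have hp : (3 : Int) ^ (a + 1) ≤ 3 ^ (b + 1) :=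
    pow_le_pow_right₀ (by norm_num) (by omega)
  omega

theorem dc_unique (n : Int) {L : Nat} (h1 : 1 ≤ L) (hlo : fBound (L - 1) < n)
    (hhi : n ≤ fBound L) : solutionDigitCount n 1 = L := by
  have hle := dc_le n 1
  have hge := dc_ge n 1
  have h0L : fBound 0 ≤ fBound (L - 1) := fBound_mono (by omega)
  have hlow := dc_lower n 1 le_rfl (by show fBound 0 < n; omega)
  set D := solutionDigitCount n 1 with hD
  rcases lt_trichotomy D L with hlt | heq | hgt
  · exfalso
    have : fBound D ≤ fBound (L - 1) := fBound_mono (by omega)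
    omega
  · exact heq
  · exfalso
    have : fBound L ≤ fBound (D - 1) := fBound_mono (by omega)
    omega

theorem digList_step (o' r : Int) (_h0 : 0 ≤ o') (hr0 : 0 ≤ r) (hr3 : r < 3) (L : Nat) :
    digList (3 * o' + r) (L + 1) =
      digList o' L ++ [PySem.List.pyGetD ["1", "2", "4"] r ""] := by
  unfold digList
  rw [List.range_succ, List.map_append]
  congr 1
  · refine List.map_congr_left (fun i hi => ?_)
    have hiL : i < L := List.mem_range.mp hi
    have he : L + 1 - 1 - i = (L - 1 - i) + 1 := by omega
    rw [he]
    rw [PySem.Int.floordiv_eq_ediv_of_pos (by positivity),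
        PySem.Int.floordiv_eq_ediv_of_pos (by positivity)]
    congr 2
    have hpow : (3 : Int) ^ (L - 1 - i + 1) = 3 * 3 ^ (L - 1 - i) := by ring
    rw [hpow, ← Int.ediv_ediv_of_nonneg (by norm_num : (0:Int) ≤ 3)]
    congr 1
    omega
  · simp only [List.map_cons, List.map_nil]
    congr 2
    have he : L + 1 - 1 - L = 0 := by omega
    rw [he, pow_zero]
    rw [PySem.Int.floordiv_eq_ediv_of_pos (by norm_num), Int.ediv_one,
        PySem.Int.mod_eq_emod_of_pos (by norm_num)]
    omega

theorem chars_join_nil (l : List (List Char)) : PySem.Chars.join [] l = l.flatten := by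
  induction l with
  | nil => rw [PySem.Chars.join_nil]; rfl
  | cons x xs ih =>
    cases xs with
    | nil => rw [PySem.Chars.join_singleton]; simp
    | cons y ys =>
      rw [PySem.Chars.join_cons_cons, ih]
      simp

theorem join_append_singleton (l : List String) (c : String) :
    PySem.Str.join "" (l ++ [c]) = PySem.Str.join "" l ++ c := by
  simp [PySem.Str.join, chars_join_nil]

theorem alt_rec (n : Int) (hn : 0 < n) :
    solution_alt n = solution_alt (PySem.Int.floordiv (n - 1) 3) ++
      PySem.List.pyGetD ["1", "2", "4"] (PySem.Int.mod (n - 1) 3) "" := by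
  rw [PySem.Int.floordiv_eq_ediv_of_pos (by norm_num),
      PySem.Int.mod_eq_emod_of_pos (by norm_num)]
  set n' := (n - 1) / 3 with hn'
  set r := (n - 1) % 3 with hr
  have hfacts : n - 1 = 3 * n' + r ∧ 0 ≤ r ∧ r < 3 ∧ 0 ≤ n' := by omega
  obtain ⟨hm, hr0, hr3, hn0⟩ := hfacts
  by_cases hz : n' ≤ 0
  · -- n ∈ {1,2,3}: one digit
    have hn3 : n ≤ 3 := by omega
    have hdc : solutionDigitCount n 1 = 1 := by
      unfold solutionDigitCount
      rw [if_neg]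
      rw [PySem.Int.floordiv_eq_ediv_of_pos (by norm_num)]
      norm_num
      omega
    rw [solution_alt, if_neg (by omega), solution_alt, if_pos hz]
    simp only [hdc]
    have ho : n - PySem.Int.floordiv ((3 : Int) ^ 1 - 3) 2 - 1 = r := by
      rw [PySem.Int.floordiv_eq_ediv_of_pos (by norm_num)]
      omega
    rw [ho]
    show PySem.Str.join "" (digList r 1) = "" ++ PySem.List.pyGetD ["1", "2", "4"] r ""
    unfold digList
    rw [List.range_one, List.map_singleton]
    have he : 1 - 1 - 0 = 0 := rfl
    rw [he, pow_zero, PySem.Int.floordiv_eq_ediv_of_pos (by norm_num), Int.ediv_one,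
        PySem.Int.mod_eq_emod_of_pos (by norm_num)]
    have hrr : r % 3 = r := by omega
    rw [hrr]
    simp [PySem.Str.join]
  · -- n' > 0: one more digit than n'
    have hz' : 0 < n' := by omega
    set L' := solutionDigitCount n' 1 with hL'
    have hge : 1 ≤ L' := dc_ge n' 1
    have hle : n' ≤ fBound L' := dc_le n' 1
    have hlow : fBound (L' - 1) < n' := by
      refine dc_lower n' 1 le_rfl ?_
      show fBound 0 < n'
      unfold fBound
      norm_num
      omega
    obtain ⟨k, hk0, hk⟩ := pow3_odd L'
    have h3k : (3 : Int) ≤ 3 ^ L' := by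
      calc (3 : Int) = 3 ^ 1 := by norm_num
        _ ≤ 3 ^ L' := pow_le_pow_right₀ (by norm_num) hge
    have hk1 : 1 ≤ k := by omega
    have e0 : fBound (L' - 1) = k - 1 := by
      unfold fBound
      rw [show L' - 1 + 1 = L' by omega, hk]
      omega
    have e1 : fBound L' = 3 * k := by
      unfold fBound
      rw [pow_succ, hk]
      omega
    have e2 : fBound (L' + 1) = 9 * k + 3 := by
      unfold fBound
      rw [show L' + 1 + 1 = L' + 1 + 1 from rfl, pow_succ, pow_succ, hk]
      omega
    have hdc : solutionDigitCount n 1 = L' + 1 := by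
      refine dc_unique n (by omega) ?_ ?_
      · rw [show L' + 1 - 1 = L' by omega, e1]
        omega
      · rw [e2]
        omega
    rw [solution_alt, if_neg (by omega), solution_alt, if_neg (by omega)]
    simp only [hdc, ← hL']
    have hg1 : PySem.Int.floordiv ((3 : Int) ^ (L' + 1) - 3) 2 = 3 * k := by
      rw [PySem.Int.floordiv_eq_ediv_of_pos (by norm_num)]
      have := e1
      unfold fBound at this
      exact this
    have hg0 : PySem.Int.floordiv ((3 : Int) ^ L' - 3) 2 = k - 1 := by
      rw [PySem.Int.floordiv_eq_ediv_of_pos (by norm_num)]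
      have := e0
      unfold fBound at this
      rw [show L' - 1 + 1 = L' by omega] at this
      exact this
    rw [hg1, hg0]
    have ho : n - 3 * k - 1 = 3 * (n' - (k - 1) - 1) + r := by omega
    rw [ho]
    show PySem.Str.join "" (digList (3 * (n' - (k - 1) - 1) + r) (L' + 1)) =
      PySem.Str.join "" (digList (n' - (k - 1) - 1) L') ++
        PySem.List.pyGetD ["1", "2", "4"] r ""
    rw [digList_step (n' - (k - 1) - 1) r (by omega) hr0 hr3 L', join_append_singleton]

theorem loopA_eq (k : Nat) : ∀ (n : Int), n.toNat ≤ k → ∀ (answer : String),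
    solutionLoopA n answer = solution_alt n ++ answer := by
  induction k with
  | zero =>
    intro n hn answer
    have hle : n ≤ 0 := by omega
    rw [solutionLoopA, solution_alt]
    simp [hle, not_lt.mpr hle]
  | succ k ih =>
    intro n hn answer
    by_cases h : n > 0
    · rw [solutionLoopA]
      rw [if_pos h]
      rw [ih _ (by rw [PySem.Int.floordiv_eq_ediv_of_pos (by norm_num)]; omega)]
      rw [alt_rec n h, String.append_assoc]
    · rw [solutionLoopA, solution_alt]
      simp [h, le_of_not_gt h]

-- ===== VERDICT (by name: the statement is the Claim_ definition above) =====
theorem solution_spec : Claim_equal_solution := by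
  intro n _
  unfold Spec_solution solution
  rw [loopA_eq n.toNat n le_rfl ""]
  simp
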